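-- pv_equiv track=rewrite | github.com/gebdevalk/musics | src/algorittm/rhythm.py | modular_rhythm
-- ===== SOURCE A (Python) =====
-- from typing import List, Tuple, Optional, Union
--
-- def modular_rhythm(modulus: int, multiplier: int, length: int, offset: int = 0) -> List[int]:
--     """
--     Generate rhythmic pattern using modular arithmetic.
--
--     Parameters:
--     modulus (int): Modulus for the operation
--     multiplier (int): Multiplier for the sequence
--     length (int): Length of the pattern
--     offset (int): Starting offset
--
--     Returns:
--     List[int]: Pattern where 1 indicates positions where (i * multiplier) % modulus == 0
--
--     Example:
--     >>> modular_rhythm(7, 3, 14, 0)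
--     [1, 0, 0, 0, 0, 0, 0, 1, 0, 0, 0, 0, 0, 0]  # Every 7th step
--     """
--     pattern = []
--     for i in range(length):
--         position = (i + offset) % modulus
--         if (position * multiplier) % modulus == 0:
--             pattern.append(1)
--         else:
--             pattern.append(0)
--     return pattern
-- ===== SOURCE B (Python) =====
-- import math
-- from typing import List
--
-- def modular_rhythm(modulus: int, multiplier: int, length: int, offset: int = 0) -> List[int]:
--     # Closed-form: (((i+offset)%modulus)*multiplier)%modulus == 0  iff  step | (i+offset),
--     # where step = |modulus| // gcd(multiplier, modulus), computed once.
--     if length <= 0: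
--         return []
--     step = abs(modulus) // math.gcd(multiplier, modulus)
--     return [1 if (i + offset) % step == 0 else 0 for i in range(length)]
-- ===== Notes on version B (the rewrite author's own statement) =====
-- stated objective: faster
-- what changed: B computes step = |modulus| // gcd(multiplier, modulus) once and marks 1 exactly where step divides (i+offset), replacing A's per-element double modular multiplication with a single cheap divisibility test.
import Mathlib
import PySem

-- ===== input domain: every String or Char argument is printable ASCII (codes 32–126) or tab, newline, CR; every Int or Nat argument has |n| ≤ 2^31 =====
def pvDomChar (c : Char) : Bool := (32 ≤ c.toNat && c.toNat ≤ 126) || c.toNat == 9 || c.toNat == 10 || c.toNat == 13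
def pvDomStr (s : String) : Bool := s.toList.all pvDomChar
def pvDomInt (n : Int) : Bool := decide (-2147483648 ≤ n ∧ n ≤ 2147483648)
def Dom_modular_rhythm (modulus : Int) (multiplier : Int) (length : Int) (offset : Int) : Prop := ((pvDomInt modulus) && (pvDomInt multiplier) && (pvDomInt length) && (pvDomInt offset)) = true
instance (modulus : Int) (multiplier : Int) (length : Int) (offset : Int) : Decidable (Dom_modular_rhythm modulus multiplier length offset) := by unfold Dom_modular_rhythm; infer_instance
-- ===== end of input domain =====

-- B computes step = |modulus| // gcd(multiplier, modulus) once and tests divisibility of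
-- (i+offset) by step, replacing A's per-element double modular multiplication (constant-factor change).


-- ===== PORT A =====
def modular_rhythm (modulus : Int) (multiplier : Int) (length : Int) (offset : Int) : List Int :=
  (PySem.List.pyRange 0 length 1).foldl (fun pattern i =>
    let position := PySem.Int.mod (i + offset) modulus
    if PySem.Int.mod (position * multiplier) modulus = 0 then pattern ++ [1] else pattern ++ [0]) []

-- ===== PORT B =====
def modular_rhythm_alt (modulus : Int) (multiplier : Int) (length : Int) (offset : Int) : List Int :=
  if length ≤ 0 then []
  else
    let step : Int := PySem.Int.floordiv ((modulus.natAbs : Int)) ((Int.gcd multiplier modulus : Int))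
    (PySem.List.pyRange 0 length 1).map (fun i => if PySem.Int.mod (i + offset) step = 0 then 1 else 0)

-- ===== PRECONDITION & SPEC =====
-- Pre_ excludes exactly the ZeroDivisionError inputs: modulus == 0 with a non-empty range.
def Pre_modular_rhythm (modulus : Int) (multiplier : Int) (length : Int) (offset : Int) : Prop :=
  modulus ≠ 0 ∨ length ≤ 0
instance (modulus : Int) (multiplier : Int) (length : Int) (offset : Int) : Decidable (Pre_modular_rhythm modulus multiplier length offset) := by unfold Pre_modular_rhythm; infer_instance
def pvWitness_modular_rhythm : Int × Int × Int × Int := (7, 3, 14, 0)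

def Spec_modular_rhythm (modulus : Int) (multiplier : Int) (length : Int) (offset : Int) (out : List Int) : Prop := out = modular_rhythm_alt modulus multiplier length offset
instance (modulus : Int) (multiplier : Int) (length : Int) (offset : Int) (out : List Int) : Decidable (Spec_modular_rhythm modulus multiplier length offset out) := by unfold Spec_modular_rhythm; infer_instance

-- ===== CLAIM (what is proved, stated in full; the proofs are below) =====
def Claim_equal_modular_rhythm : Prop := ∀ (modulus : Int) (multiplier : Int) (length : Int) (offset : Int), Dom_modular_rhythm modulus multiplier length offset → Pre_modular_rhythm modulus multiplier length offset → Spec_modular_rhythm modulus multiplier length offset (modular_rhythm modulus multiplier length offset)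

-- ===== LEMMAS AND PROOFS =====

-- A's residue test is divisibility of (i+offset)*multiplier by modulus.
lemma test_A_dvd (m b x : Int) :
    (PySem.Int.mod (PySem.Int.mod x m * b) m = 0) ↔ m ∣ x * b := by
  rw [PySem.Int.mod_eq_zero_iff_dvd]
  have hx : PySem.Int.mod x m = x - PySem.Int.floordiv x m * m := by
    have := PySem.Int.floordiv_mul_add_mod x m; linarith
  rw [hx]
  constructor
  · intro h
    have : x * b = (x - PySem.Int.floordiv x m * m) * b + m * (PySem.Int.floordiv x m * b) := by ring
    rw [this]; exact dvd_add h (Dvd.intro _ rfl)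
  · intro h
    have : (x - PySem.Int.floordiv x m * m) * b = x * b - m * (PySem.Int.floordiv x m * b) := by ring
    rw [this]; exact dvd_sub h (Dvd.intro _ rfl)

-- divisibility by m of x*b is divisibility of x by |m| / gcd(b, m).
lemma dvd_step_iff (m b x : Int) (hm : m ≠ 0) :
    m ∣ x * b ↔ ((m.natAbs / Int.gcd b m : Nat) : Int) ∣ x := by
  set g : Int := (Int.gcd b m : Int) with hg
  have hgpos : 0 < Int.gcd b m := Int.gcd_pos_of_ne_zero_right b hm
  have hgne : g ≠ 0 := by simp [hg]; omega
  have hgb : g ∣ b := Int.gcd_dvd_left b m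
  have hgm : g ∣ m := Int.gcd_dvd_right b m
  have hcop : IsCoprime (b / g) (m / g) := by
    rw [Int.isCoprime_iff_gcd_eq_one]
    exact Int.gcd_div_gcd_div_gcd hgpos
  have habs : ((m.natAbs / Int.gcd b m : Nat) : Int) ∣ x ↔ (m / g) ∣ x := by
    have h1 : (m / g).natAbs = m.natAbs / Int.gcd b m := by
      rw [hg, Int.natAbs_ediv_of_dvd hgm, Int.natAbs_natCast]
    rw [← h1, Int.natAbs_dvd]
  rw [habs]
  constructor
  · intro h
    have hm' : m = (m / g) * g := (Int.ediv_mul_cancel hgm).symm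
    have hb' : b = (b / g) * g := (Int.ediv_mul_cancel hgb).symm
    have h2 : (m / g) * g ∣ (x * (b / g)) * g := by
      rw [← hm']
      have : (x * (b / g)) * g = x * b := by rw [mul_assoc, ← hb']
      rwa [this]
    have h3 : (m / g) ∣ x * (b / g) := (mul_dvd_mul_iff_right hgne).mp h2
    exact (hcop.symm).dvd_of_dvd_mul_right h3
  · intro h
    have hb' : b = (b / g) * g := (Int.ediv_mul_cancel hgb).symm
    have hm' : m = (m / g) * g := (Int.ediv_mul_cancel hgm).symm
    calc m = (m / g) * g := hm'
      _ ∣ (x * (b / g)) * g := mul_dvd_mul_right (h.mul_right _) g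
      _ = x * b := by rw [mul_assoc, ← hb']

lemma foldl_A_eq_map (m b o : Int) (l : List Int) :
    l.foldl (fun pattern i =>
      let position := PySem.Int.mod (i + o) m
      if PySem.Int.mod (position * b) m = 0 then pattern ++ [1] else pattern ++ [0]) [] =
    l.map (fun i => if PySem.Int.mod (PySem.Int.mod (i + o) m * b) m = 0 then (1 : Int) else 0) := by
  have h2 : (fun (pattern : List Int) i =>
      let position := PySem.Int.mod (i + o) m
      if PySem.Int.mod (position * b) m = 0 then pattern ++ [1] else pattern ++ [0]) =
      (fun acc i => acc ++ [if PySem.Int.mod (PySem.Int.mod (i + o) m * b) m = 0 then (1 : Int) else 0]) := by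
    funext acc i
    by_cases hc : PySem.Int.mod (PySem.Int.mod (i + o) m * b) m = 0 <;> simp [hc]
  rw [h2, PySem.List.foldl_append_singleton_eq_map, List.nil_append]

-- ===== VERDICT (by name: the statement is the Claim_ definition above) =====
theorem modular_rhythm_spec : Claim_equal_modular_rhythm := by
  intro m b len o _ hpre
  unfold Spec_modular_rhythm modular_rhythm modular_rhythm_alt
  by_cases hlen : len ≤ 0
  · simp [hlen, PySem.List.pyRange_one_eq_nil (by omega : len ≤ 0)]
  · have hm : m ≠ 0 := hpre.resolve_right hlen
    simp only [if_neg hlen]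
    rw [foldl_A_eq_map]
    apply List.map_congr_left
    intro i _
    have := (test_A_dvd m b (i + o)).trans (dvd_step_iff m b (i + o) hm)
    simp only [PySem.Int.floordiv_natCast, PySem.Int.mod_eq_zero_iff_dvd]
    rw [PySem.Int.mod_eq_zero_iff_dvd] at this
    have hc2 : ((m.natAbs / Int.gcd b m : Nat) : Int) = |m| / ((Int.gcd b m : Nat) : Int) := by
      rw [Int.natCast_div, Int.abs_eq_natAbs]
    by_cases hd : ((m.natAbs / Int.gcd b m : Nat) : Int) ∣ (i + o)
    · simp [this.mpr hd, hc2 ▸ hd]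
    · simp [mt this.mp hd, hc2 ▸ hd]
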